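-- pv_equiv track=rewrite | github.com/Seanaaa0/GPT-CoT | source/generate_11x11_map.py | generate_cot_steps
-- ===== SOURCE A (Python) =====
-- def generate_cot_steps(start, actions):
--     x, y = start
--     steps = [f"Start at ({x},{y})"]
--     for i, (dx, dy) in enumerate(actions):
--         x += dx
--         y += dy
--         steps.append(f"Step {i+1}: ({x-dx},{y-dy}) + ({dx},{dy}) = ({x},{y})")
--     steps.append(f"Final position: ({x},{y})")
--     return "\n".join(steps), (x, y)
-- ===== SOURCE B (Python) =====
-- def generate_cot_steps(start, actions):
--     # Pass 1: prefix table of visited positions (positions[i] = after i moves).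
--     positions = [start]
--     for dx, dy in actions:
--         px, py = positions[-1]
--         positions.append((px + dx, py + dy))
--     # Pass 2: format lines from consecutive position pairs zipped with deltas.
--     lines = [f"Start at ({positions[0][0]},{positions[0][1]})"]
--     for i, ((p, q), d) in enumerate(zip(zip(positions, positions[1:]), actions)):
--         lines.append(f"Step {i+1}: ({p[0]},{p[1]}) + ({d[0]},{d[1]}) = ({q[0]},{q[1]})")
--     lines.append(f"Final position: ({positions[-1][0]},{positions[-1][1]})")
--     return "\n".join(lines), positions[-1]
-- ===== Notes on version B (the rewrite author's own statement) =====
-- stated objective: alternative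
-- what changed: B replaces A's single fused loop (mutating x,y while appending lines) with a two-pass decomposition: first a prefix table of all visited positions, then a formatting pass over consecutive position pairs zipped with the deltas.
import Mathlib
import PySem

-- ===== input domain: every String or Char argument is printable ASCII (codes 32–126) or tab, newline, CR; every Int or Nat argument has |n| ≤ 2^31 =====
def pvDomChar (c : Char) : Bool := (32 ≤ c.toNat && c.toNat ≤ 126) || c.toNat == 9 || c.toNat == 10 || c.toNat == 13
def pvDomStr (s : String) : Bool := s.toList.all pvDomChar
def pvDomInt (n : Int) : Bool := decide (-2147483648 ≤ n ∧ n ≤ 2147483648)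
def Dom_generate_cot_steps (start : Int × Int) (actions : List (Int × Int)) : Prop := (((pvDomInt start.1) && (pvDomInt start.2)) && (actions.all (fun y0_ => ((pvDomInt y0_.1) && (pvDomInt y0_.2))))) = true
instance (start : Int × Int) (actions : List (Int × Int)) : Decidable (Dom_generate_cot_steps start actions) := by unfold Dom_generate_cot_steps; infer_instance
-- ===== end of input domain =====

-- B builds the full prefix table of visited positions first, then formats lines from
-- consecutive position pairs zipped with the deltas (alternative decomposition, same cost).


-- shared f-string fragment "({a},{b})"
def pvPos (x y : Int) : List Char :=
  '(' :: PySem.Int.toChars x ++ ',' :: PySem.Int.toChars y ++ [')']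

-- ===== PORT A =====
-- f"Step {i+1}: ({x-dx},{y-dy}) + ({dx},{dy}) = ({x},{y})" (x, y already updated)
def pvStepLineA (i : Int) (x y dx dy : Int) : List Char :=
  ("Step ").toList ++ PySem.Int.toChars (i + 1) ++ (": ").toList ++
  pvPos (x - dx) (y - dy) ++ (" + ").toList ++ pvPos dx dy ++ (" = ").toList ++ pvPos x y

-- the for-loop of A over enumerate(actions), accumulating steps and x, y
def pvLoopA : List (Int × (Int × Int)) → Int → Int → List (List Char) → List (List Char) × Int × Int
  | [], x, y, steps => (steps, x, y)
  | (i, (dx, dy)) :: rest, x, y, steps =>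
      pvLoopA rest (x + dx) (y + dy) (steps ++ [pvStepLineA i (x + dx) (y + dy) dx dy])

def generate_cot_steps (start : Int × Int) (actions : List (Int × Int)) : String × (Int × Int) :=
  let r := pvLoopA (PySem.List.enumerate actions 0) start.1 start.2
            [("Start at ").toList ++ pvPos start.1 start.2]
  let steps := r.1 ++ [("Final position: ").toList ++ pvPos r.2.1 r.2.2]
  (String.mk (PySem.Chars.join ("\n").toList steps), (r.2.1, r.2.2))

-- ===== PORT B =====
-- f"Step {i+1}: ({p[0]},{p[1]}) + ({d[0]},{d[1]}) = ({q[0]},{q[1]})"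
def pvStepLineB (i : Int) (p d q : Int × Int) : List Char :=
  ("Step ").toList ++ PySem.Int.toChars (i + 1) ++ (": ").toList ++
  pvPos p.1 p.2 ++ (" + ").toList ++ pvPos d.1 d.2 ++ (" = ").toList ++ pvPos q.1 q.2

def generate_cot_steps_alt (start : Int × Int) (actions : List (Int × Int)) : String × (Int × Int) :=
  let positions := List.scanl (fun p d => (p.1 + d.1, p.2 + d.2)) start actions
  let last := positions.getLastD start
  let stepLines := (PySem.List.enumerate ((positions.zip positions.tail).zip actions) 0).map
      (fun e => pvStepLineB e.1 e.2.1.1 e.2.2 e.2.1.2)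
  let lines := (("Start at ").toList ++ pvPos start.1 start.2) :: stepLines ++
      [("Final position: ").toList ++ pvPos last.1 last.2]
  (String.mk (PySem.Chars.join ("\n").toList lines), last)

-- ===== PRECONDITION & SPEC =====
def Spec_generate_cot_steps (start : Int × Int) (actions : List (Int × Int)) (out : String × (Int × Int)) : Prop := out = generate_cot_steps_alt start actions
instance (start : Int × Int) (actions : List (Int × Int)) (out : String × (Int × Int)) : Decidable (Spec_generate_cot_steps start actions out) := by unfold Spec_generate_cot_steps; infer_instance

-- ===== CLAIM (what is proved, stated in full; the proofs are below) =====
def Claim_equal_generate_cot_steps : Prop := ∀ (start : Int × Int) (actions : List (Int × Int)), Dom_generate_cot_steps start actions → Spec_generate_cot_steps start actions (generate_cot_steps start actions)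

-- ===== LEMMAS AND PROOFS =====

-- common specification of the step lines and final position
def pvMkLines (i : Int) (p : Int × Int) : List (Int × Int) → List (List Char)
  | [] => []
  | d :: rest => pvStepLineB i p d (p.1 + d.1, p.2 + d.2) :: pvMkLines (i + 1) (p.1 + d.1, p.2 + d.2) rest

def pvFinal (p : Int × Int) (actions : List (Int × Int)) : Int × Int :=
  actions.foldl (fun p d => (p.1 + d.1, p.2 + d.2)) p

lemma pvStepLineA_eq (i x y dx dy : Int) :
    pvStepLineA i (x + dx) (y + dy) dx dy = pvStepLineB i (x, y) (dx, dy) (x + dx, y + dy) := by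
  simp [pvStepLineA, pvStepLineB]

lemma pvLoopA_spec (actions : List (Int × Int)) : ∀ (i x y : Int) (steps : List (List Char)),
    pvLoopA (PySem.List.enumerate actions i) x y steps =
      (steps ++ pvMkLines i (x, y) actions, pvFinal (x, y) actions) := by
  induction actions with
  | nil => intro i x y steps; simp [PySem.List.enumerate_nil, pvLoopA, pvMkLines, pvFinal]
  | cons d rest ih =>
      intro i x y steps
      obtain ⟨dx, dy⟩ := d
      rw [PySem.List.enumerate_cons, pvLoopA, ih]
      simp [pvMkLines, pvFinal, pvStepLineA_eq]

lemma pvScanl_head (p : Int × Int) (l : List (Int × Int)) :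
    List.scanl (fun p d => (p.1 + d.1, p.2 + d.2)) p l =
      p :: (List.scanl (fun p d => (p.1 + d.1, p.2 + d.2)) p l).tail := by
  cases l <;> simp

lemma pvScanl_lines (actions : List (Int × Int)) : ∀ (i : Int) (p : Int × Int),
    (PySem.List.enumerate
        (((List.scanl (fun p d => (p.1 + d.1, p.2 + d.2)) p actions).zip
          (List.scanl (fun p d => (p.1 + d.1, p.2 + d.2)) p actions).tail).zip actions) i).map
        (fun e => pvStepLineB e.1 e.2.1.1 e.2.2 e.2.1.2) = pvMkLines i p actions := by
  induction actions with
  | nil => intro i p; simp [List.scanl_nil, PySem.List.enumerate_nil, pvMkLines]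
  | cons d rest ih =>
      intro i p
      rw [List.scanl_cons, List.tail_cons, pvScanl_head (p.1 + d.1, p.2 + d.2) rest,
        List.zip_cons_cons, List.zip_cons_cons, ← pvScanl_head (p.1 + d.1, p.2 + d.2) rest,
        PySem.List.enumerate_cons, List.map_cons]
      simp only [pvMkLines]
      rw [ih]

lemma pvScanl_last (actions : List (Int × Int)) : ∀ (p dflt : Int × Int),
    (List.scanl (fun p d => (p.1 + d.1, p.2 + d.2)) p actions).getLastD dflt = pvFinal p actions := by
  induction actions with
  | nil => intro p dflt; simp [List.scanl_nil, pvFinal]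
  | cons d rest ih =>
      intro p dflt
      rw [List.scanl_cons, List.getLastD_cons, ih]
      simp [pvFinal]

-- ===== VERDICT (by name: the statement is the Claim_ definition above) =====
theorem generate_cot_steps_spec : Claim_equal_generate_cot_steps := by
  intro start actions _
  unfold Spec_generate_cot_steps generate_cot_steps generate_cot_steps_alt
  simp only [pvLoopA_spec, pvScanl_lines, pvScanl_last]
  simp
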